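-- pv_equiv track=rewrite | github.com/mirkosaenz/Teoria-De-Algoritmos | Guia/02. Greedy/13.py | cobertura
-- ===== SOURCE A (Python) =====
-- def cobertura(casas, R, K):
--     antenas = []
--     casas = sorted(casas)
--
--     for casa in casas:
--         if len(antenas) == 0 or antenas[len(antenas)-1] + R < casa:
--             nueva_antena = casa+R
--             if nueva_antena > K:
--                 nueva_antena = K
--
--             antenas.append(nueva_antena)
--
--     return antenas
-- ===== SOURCE B (Python) =====
-- def cobertura(casas, R, K):
--     xs = sorted(casas)
--     n = len(xs)
--     antenas = []
--     i = 0
--     while i < n: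
--         pos = min(xs[i] + R, K)
--         antenas.append(pos)
--         # binary search: first index in (i, n) whose house lies beyond pos + R
--         lo, hi = i + 1, n
--         while lo < hi:
--             mid = (lo + hi) // 2
--             if xs[mid] <= pos + R:
--                 lo = mid + 1
--             else:
--                 hi = mid
--         i = lo
--     return antenas
-- ===== Notes on version B (the rewrite author's own statement) =====
-- stated objective: alternative
-- what changed: B replaces A's per-house coverage test with place-and-jump: after placing an antenna at min(xs[i]+R, K), a hand-written binary search locates the first house beyond the antenna's reach, so covered houses are skipped in bulk instead of being tested one by one.
import Mathlib
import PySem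

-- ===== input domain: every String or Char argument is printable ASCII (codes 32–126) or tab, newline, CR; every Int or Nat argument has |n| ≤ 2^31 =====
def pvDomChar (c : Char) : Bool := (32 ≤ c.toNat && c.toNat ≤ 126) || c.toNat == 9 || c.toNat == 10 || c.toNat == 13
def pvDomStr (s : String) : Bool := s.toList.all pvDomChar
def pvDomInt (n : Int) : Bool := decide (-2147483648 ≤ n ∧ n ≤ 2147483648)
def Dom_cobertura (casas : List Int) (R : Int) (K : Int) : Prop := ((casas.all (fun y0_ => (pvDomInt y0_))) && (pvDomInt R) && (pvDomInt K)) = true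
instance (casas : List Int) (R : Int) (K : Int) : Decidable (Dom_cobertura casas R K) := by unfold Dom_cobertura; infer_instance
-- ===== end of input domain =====

-- B places each antenna and then binary-searches for the first uncovered house instead of
-- testing every house against the last antenna; same output, proved equal on all inputs.

-- ===== PORT A =====
-- body of A's for-loop: place an antenna iff no antenna yet or the last one misses the house
-- (antenas[len(antenas)-1] for a nonempty list is its last element → getLastD, guarded by the
-- length-0 test exactly as the Python short-circuit `or` guards the index)
def coberturaStep (R : Int) (K : Int) (antenas : List Int) (casa : Int) : List Int :=
  if antenas.length = 0 ∨ antenas.getLastD 0 + R < casa then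
    let nueva := casa + R
    let nueva := if nueva > K then K else nueva
    antenas ++ [nueva]
  else antenas

def cobertura (casas : List Int) (R : Int) (K : Int) : List Int :=
  (PySem.List.sorted casas (fun x => x) false).foldl (coberturaStep R K) []

-- ===== PORT B =====
-- Source B's inner while loop: binary search for the first index in [lo, hi) whose house
-- exceeds v (xs[mid] reads a valid index there, so getD is exact); the fuel argument is
-- only a structural bound on the number of halvings (any fuel ≥ hi - lo gives the loop)
def bsearchGT (xs : List Int) (v : Int) : Nat → Nat → Nat → Nat
  | 0, lo, _ => lo
  | fuel + 1, lo, hi =>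
    if lo < hi then
      -- mid = (lo + hi) // 2, inlined
      if xs.getD ((lo + hi) / 2) 0 ≤ v then bsearchGT xs v fuel ((lo + hi) / 2 + 1) hi
      else bsearchGT xs v fuel lo ((lo + hi) / 2)
    else lo

-- Source B's outer while loop: the index i, jumping via the binary search; fuel bounds the
-- number of placements (any fuel ≥ n - i gives the loop)
def placeLoop (xs : List Int) (R K : Int) (n : Nat) : Nat → Nat → List Int
  | 0, _ => []
  | fuel + 1, i =>
    if i < n then
      let pos := min (xs.getD i 0 + R) K
      pos :: placeLoop xs R K n fuel (bsearchGT xs (pos + R) n (i + 1) n)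
    else []

def cobertura_alt (casas : List Int) (R : Int) (K : Int) : List Int :=
  placeLoop (PySem.List.sorted casas (fun x => x) false) R K
    (PySem.List.sorted casas (fun x => x) false).length
    (PySem.List.sorted casas (fun x => x) false).length 0

-- ===== PRECONDITION & SPEC =====
def Spec_cobertura (casas : List Int) (R : Int) (K : Int) (out : List Int) : Prop := out = cobertura_alt casas R K
instance (casas : List Int) (R : Int) (K : Int) (out : List Int) : Decidable (Spec_cobertura casas R K out) := by unfold Spec_cobertura; infer_instance

-- ===== CLAIM (what is proved, stated in full; the proofs are below) =====
def Claim_equal_cobertura : Prop := ∀ (casas : List Int) (R : Int) (K : Int), Dom_cobertura casas R K → Spec_cobertura casas R K (cobertura casas R K)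

-- ===== LEMMAS AND PROOFS =====

-- scan form both programs are reduced to: place at the head, drop the covered prefix
def skipCov (limit : Int) : List Int → List Int
  | [] => []
  | y :: t => if y ≤ limit then skipCov limit t else y :: t

theorem skipCov_length_le (limit : Int) (xs : List Int) :
    (skipCov limit xs).length ≤ xs.length := by
  induction xs with
  | nil => simp [skipCov]
  | cons y t ih =>
    simp only [skipCov]
    split
    · simp only [List.length_cons]; omega
    · simp

def coberturaLoop (R : Int) (K : Int) : List Int → List Int
  | [] => []
  | x :: t =>
    let pos := min (x + R) K
    pos :: coberturaLoop R K (skipCov (pos + R) t)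
termination_by xs => xs.length
decreasing_by
  simpa using Nat.lt_succ_of_le (skipCov_length_le _ t)

-- A-side: loop invariant — with last antenna p already placed, A's remaining fold appends
-- exactly the place-and-skip result on the houses not yet covered by p
theorem foldl_step_eq (R K : Int) (t : List Int) : ∀ (acc : List Int) (p : Int),
    t.foldl (coberturaStep R K) (acc ++ [p]) =
      (acc ++ [p]) ++ coberturaLoop R K (skipCov (p + R) t) := by
  induction t with
  | nil => intro acc p; simp [coberturaLoop, skipCov]
  | cons y t ih =>
    intro acc p
    by_cases h : y ≤ p + R
    · have hstep : coberturaStep R K (acc ++ [p]) y = acc ++ [p] := by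
        simp [coberturaStep]; omega
      simp only [List.foldl_cons, hstep, skipCov, if_pos h]
      exact ih acc p
    · have hq : (if y + R > K then K else y + R) = min (y + R) K := by
        split <;> omega
      have hstep : coberturaStep R K (acc ++ [p]) y
          = (acc ++ [p]) ++ [min (y + R) K] := by
        simp [coberturaStep, hq]; omega
      simp only [List.foldl_cons, hstep, skipCov, if_neg h]
      rw [ih (acc ++ [p]) (min (y + R) K)]
      simp [coberturaLoop]

theorem cobertura_eq_loop (casas : List Int) (R K : Int) :
    cobertura casas R K = coberturaLoop R K (PySem.List.sorted casas (fun x => x) false) := by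
  unfold cobertura
  cases hs : PySem.List.sorted casas (fun x => x) false with
  | nil => simp [coberturaLoop]
  | cons x t =>
    have hstep : coberturaStep R K [] x = [min (x + R) K] := by
      have hq : (if x + R > K then K else x + R) = min (x + R) K := by
        split <;> omega
      simp [coberturaStep, hq]
    simp only [List.foldl_cons, hstep]
    have := foldl_step_eq R K t [] (min (x + R) K)
    simpa [coberturaLoop] using this

-- monotone indexed access in a sorted list
theorem getD_mono_of_pairwise (xs : List Int) (hsort : xs.Pairwise (· ≤ ·))
    {a b : Nat} (hab : a ≤ b) (hb : b < xs.length) : xs.getD a 0 ≤ xs.getD b 0 := by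
  rcases Nat.lt_or_ge a b with h | h
  · rw [List.getD_eq_getElem xs 0 (by omega), List.getD_eq_getElem xs 0 hb]
    exact List.pairwise_iff_getElem.mp hsort a b (by omega) hb h
  · have : a = b := by omega
    subst this; rfl

-- characterisation of the binary search on a sorted list (fuel ≥ hi - lo suffices)
theorem bsearchGT_spec (xs : List Int) (hsort : xs.Pairwise (· ≤ ·)) (v : Int) :
    ∀ fuel lo hi, hi - lo ≤ fuel → lo ≤ hi → hi ≤ xs.length →
      lo ≤ bsearchGT xs v fuel lo hi ∧ bsearchGT xs v fuel lo hi ≤ hi ∧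
        (∀ j, lo ≤ j → j < bsearchGT xs v fuel lo hi → xs.getD j 0 ≤ v) ∧
        (bsearchGT xs v fuel lo hi < hi → v < xs.getD (bsearchGT xs v fuel lo hi) 0) := by
  intro fuel
  induction fuel with
  | zero =>
    intro lo hi hf hle _
    rw [bsearchGT]
    exact ⟨le_refl _, hle, fun j h1 h2 => by omega, fun h => by omega⟩
  | succ m ih =>
    intro lo hi hf hle hlen
    rw [bsearchGT]
    by_cases h : lo < hi
    · rw [if_pos h]
      have hmid : lo ≤ (lo + hi) / 2 ∧ (lo + hi) / 2 < hi := by constructor <;> omega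
      by_cases hc : xs.getD ((lo + hi) / 2) 0 ≤ v
      · rw [if_pos hc]
        obtain ⟨h1, h2, h3, h4⟩ := ih ((lo + hi) / 2 + 1) hi (by omega) (by omega) hlen
        refine ⟨by omega, h2, ?_, h4⟩
        intro j hj1 hj2
        rcases Nat.lt_or_ge j ((lo + hi) / 2 + 1) with hj | hj
        · exact le_trans (getD_mono_of_pairwise xs hsort (by omega) (by omega)) hc
        · exact h3 j hj hj2
      · rw [if_neg hc]
        obtain ⟨h1, h2, h3, h4⟩ := ih lo ((lo + hi) / 2) (by omega) (by omega) (by omega)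
        refine ⟨h1, by omega, h3, ?_⟩
        intro _
        rcases Nat.lt_or_ge (bsearchGT xs v m lo ((lo + hi) / 2)) ((lo + hi) / 2) with hr | hr
        · exact h4 hr
        · have heq : bsearchGT xs v m lo ((lo + hi) / 2) = (lo + hi) / 2 := by omega
          rw [heq]; omega
    · rw [if_neg h]
      exact ⟨le_refl _, hle, fun j h1 h2 => by omega, fun hlt => by omega⟩

-- dropping to the search result is exactly skipping the covered prefix
theorem skipCov_drop_eq (xs : List Int) (v : Int) :
    ∀ lo r, lo ≤ r → r ≤ xs.length →
      (∀ j, lo ≤ j → j < r → xs.getD j 0 ≤ v) → (r < xs.length → v < xs.getD r 0) →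
      skipCov v (xs.drop lo) = xs.drop r := by
  intro lo r hlr
  induction hd : r - lo generalizing lo with
  | zero =>
    intro hr hbelow habove
    have : lo = r := by omega
    subst this
    rcases Nat.lt_or_ge lo xs.length with h | h
    · rw [List.drop_eq_getElem_cons h]
      simp only [skipCov]
      rw [if_neg (by have hge := habove h; rw [List.getD_eq_getElem xs 0 h] at hge; omega),
        ← List.drop_eq_getElem_cons h]
    · rw [List.drop_eq_nil_of_le h]; simp [skipCov]
  | succ m ih =>
    intro hr hbelow habove
    have hlo : lo < xs.length := by omega
    rw [List.drop_eq_getElem_cons hlo]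
    simp only [skipCov]
    rw [if_pos (by have := hbelow lo (le_refl _) (by omega);
                   rw [List.getD_eq_getElem xs 0 hlo] at this; exact this)]
    exact ih (lo + 1) (by omega) (by omega) hr (fun j hj1 hj2 => hbelow j (by omega) hj2) habove

-- B's indexed jump loop computes the place-and-skip scan of the suffix from i
theorem placeLoop_eq (xs : List Int) (hsort : xs.Pairwise (· ≤ ·)) (R K : Int) :
    ∀ fuel i, xs.length - i ≤ fuel →
      placeLoop xs R K xs.length fuel i = coberturaLoop R K (xs.drop i) := by
  intro fuel
  induction fuel with
  | zero =>
    intro i hi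
    rw [placeLoop, List.drop_eq_nil_of_le (by omega)]
    simp [coberturaLoop]
  | succ m ih =>
    intro i hi
    rcases Nat.lt_or_ge i xs.length with h | h
    · rw [placeLoop, if_pos h, List.drop_eq_getElem_cons h]
      simp only [coberturaLoop]
      rw [List.getD_eq_getElem xs 0 h]
      set pos := min (xs[i] + R) K with hpos
      obtain ⟨h1, h2, h3, h4⟩ :=
        bsearchGT_spec xs hsort (pos + R) xs.length (i + 1) xs.length (by omega) (by omega)
          (le_refl _)
      rw [ih (bsearchGT xs (pos + R) xs.length (i + 1) xs.length) (by omega)]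
      rw [skipCov_drop_eq xs (pos + R) (i + 1) _ h1 h2 h3 h4]
    · rw [placeLoop, if_neg (by omega), List.drop_eq_nil_of_le h]
      simp [coberturaLoop]

theorem cobertura_eq_alt (casas : List Int) (R K : Int) :
    cobertura casas R K = cobertura_alt casas R K := by
  rw [cobertura_eq_loop]
  unfold cobertura_alt
  have hsort : (PySem.List.sorted casas (fun x => x) false).Pairwise (· ≤ ·) :=
    PySem.List.sorted_pairwise casas (fun x => x)
  rw [placeLoop_eq _ hsort R K (PySem.List.sorted casas (fun x => x) false).length 0 (by omega)]
  simp

-- ===== VERDICT (by name: the statement is the Claim_ definition above) =====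
theorem cobertura_spec : Claim_equal_cobertura := by
  intro casas R K _
  unfold Spec_cobertura
  exact cobertura_eq_alt casas R K
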